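-- pv_equiv track=rewrite | github.com/lslumass/SciKit | SciKit/utils.py | remove_zero
-- ===== SOURCE A (Python) =====
-- def remove_zero(xs, ys):
--     """
--     Find the x-range that spans the non-zero support of a distribution.
--
--     Scans ``ys`` from both ends to locate the first and last non-zero values,
--     then returns the corresponding ``xs`` positions offset by ±5 index
--     positions to retain a small margin around the support.
--
--     Parameters
--     ----------
--     xs : array_like
--         1-D array of x-axis values (e.g., bin centers).
--     ys : array_like
--         1-D array of y-axis values (e.g., PDF or PMF). Must be the same
--         length as ``xs``.
--
--     Returns
--     -------
--     x_nozero : 1-D array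
--         x values within the non-zero support of the distribution.
--     y_nozero : 1-D array
--         Corresponding y values within the non-zero support.
--
--     Examples
--     --------
--     >>> x, y = scatter2hist(distances, num_bin=50, styles='pdf')
--     >>> x_new, y_new = remove_zero(x, y)
--     >>> ax.plot(x_new, y_new)
--     """
--     for idx in range(len(xs)):
--         if ys[idx] != 0:
--             start = idx - 5
--             break
--     for idx in reversed(range(len(xs))):
--         if ys[idx] != 0:
--             end = idx + 5
--             break
--     return xs[start:end], ys[start:end]
-- ===== SOURCE B (Python) =====
-- def remove_zero(xs, ys):
--     """Single forward pass: record start at the first non-zero y, keep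
--     updating end at every non-zero y, then slice once at the end."""
--     start = end = None
--     for i, y in enumerate(ys[:len(xs)]):
--         if y != 0:
--             if start is None:
--                 start = i - 5
--             end = i + 5
--     return xs[start:end], ys[start:end]
-- ===== Notes on version B (the rewrite author's own statement) =====
-- stated objective: alternative
-- what changed: Two separate scans (forward for the first non-zero, reversed for the last) are replaced by a single forward pass over enumerate(ys[:len(xs)]) that sets start once and keeps updating end, then slices.
import Mathlib
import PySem

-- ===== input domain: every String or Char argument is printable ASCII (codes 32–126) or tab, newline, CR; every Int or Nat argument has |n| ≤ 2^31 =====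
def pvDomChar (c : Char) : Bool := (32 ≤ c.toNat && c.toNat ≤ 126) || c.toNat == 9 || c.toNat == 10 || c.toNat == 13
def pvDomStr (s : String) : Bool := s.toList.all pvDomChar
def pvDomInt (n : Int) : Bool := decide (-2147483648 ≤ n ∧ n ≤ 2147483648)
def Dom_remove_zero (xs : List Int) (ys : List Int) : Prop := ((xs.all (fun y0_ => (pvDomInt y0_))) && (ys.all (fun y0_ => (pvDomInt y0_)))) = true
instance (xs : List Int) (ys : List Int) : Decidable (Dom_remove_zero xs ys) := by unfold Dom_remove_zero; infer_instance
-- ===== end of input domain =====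

-- B replaces A's two scans (forward + reversed) by one forward pass keeping first/last
-- non-zero offsets; equal return values on Pre_ (where A returns at all).

-- ===== PORT A =====
-- first loop: 'for idx in range(len(xs)): if ys[idx] != 0: start = idx - 5; break'
def pvA_fwd (ys : List Int) : List Int → Option Int
  | [] => none
  | i :: rest =>
    match PySem.List.pyGet? ys i with
    | none => none                               -- IndexError (outside Pre_)
    | some y => if y ≠ 0 then some (i - 5) else pvA_fwd ys rest

-- second loop: 'for idx in reversed(range(len(xs))): if ys[idx] != 0: end = idx + 5; break'
def pvA_bwd (ys : List Int) : List Int → Option Int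
  | [] => none
  | i :: rest =>
    match PySem.List.pyGet? ys i with
    | none => none                               -- IndexError (outside Pre_)
    | some y => if y ≠ 0 then some (i + 5) else pvA_bwd ys rest

def remove_zero (xs : List Int) (ys : List Int) : List Int × List Int :=
  match pvA_fwd ys (PySem.List.pyRange 0 (xs.length : Int) 1),
        pvA_bwd ys ((PySem.List.pyRange 0 (xs.length : Int) 1).reverse) with
  | some s, some e => (PySem.List.slice xs (some s) (some e), PySem.List.slice ys (some s) (some e))
  | _, _ => ([], [])                             -- UnboundLocalError (outside Pre_)

-- ===== PORT B =====
-- loop body: 'if y != 0: (start = i - 5 if start is None); end = i + 5'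
def pvB_step (st : Option Int × Option Int) (p : Int × Int) : Option Int × Option Int :=
  if p.2 ≠ 0 then (some (st.1.getD (p.1 - 5)), some (p.1 + 5)) else st

def remove_zero_alt (xs : List Int) (ys : List Int) : List Int × List Int :=
  let st := (PySem.List.enumerate (PySem.List.slice ys none (some (xs.length : Int))) 0).foldl pvB_step (none, none)
  (PySem.List.slice xs st.1 st.2, PySem.List.slice ys st.1 st.2)

-- ===== PRECONDITION & SPEC =====
-- Pre_ excludes exactly the inputs where A raises: ys shorter than xs (IndexError in
-- the reversed scan) or no non-zero value among ys[:len(xs)] (UnboundLocalError).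
def Pre_remove_zero (xs : List Int) (ys : List Int) : Prop :=
  xs.length ≤ ys.length ∧ (ys.take xs.length).any (fun y => y != 0) = true
instance (xs : List Int) (ys : List Int) : Decidable (Pre_remove_zero xs ys) := by unfold Pre_remove_zero; infer_instance
def pvWitness_remove_zero : List Int × List Int := ([0, 1, 2], [0, 3, 0])

def Spec_remove_zero (xs : List Int) (ys : List Int) (out : List Int × List Int) : Prop := out = remove_zero_alt xs ys
instance (xs : List Int) (ys : List Int) (out : List Int × List Int) : Decidable (Spec_remove_zero xs ys out) := by unfold Spec_remove_zero; infer_instance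

-- ===== CLAIM (what is proved, stated in full; the proofs are below) =====
def Claim_equal_remove_zero : Prop := ∀ (xs : List Int) (ys : List Int), Dom_remove_zero xs ys → Pre_remove_zero xs ys → Spec_remove_zero xs ys (remove_zero xs ys)

-- ===== LEMMAS AND PROOFS =====

-- the two components of B's fold are independent
def pvStepF (a : Option Int) (p : Int × Int) : Option Int :=
  if p.2 ≠ 0 then some (a.getD (p.1 - 5)) else a
def pvStepL (b : Option Int) (p : Int × Int) : Option Int :=
  if p.2 ≠ 0 then some (p.1 + 5) else b

theorem pvFold_split (l : List (Int × Int)) : ∀ (a b : Option Int),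
    l.foldl pvB_step (a, b) = (l.foldl pvStepF a, l.foldl pvStepL b) := by
  induction l with
  | nil => intro a b; rfl
  | cons p l ih =>
    intro a b
    have h : pvB_step (a, b) p = (pvStepF a p, pvStepL b p) := by
      simp only [pvB_step, pvStepF, pvStepL]
      split_ifs <;> rfl
    simp [List.foldl_cons, h, ih]

theorem pvStepF_some (l : List (Int × Int)) (s : Int) :
    l.foldl pvStepF (some s) = some s := by
  induction l with
  | nil => rfl
  | cons p l ih => simpa [pvStepF] using ih

theorem pvStepF_none (l : List (Int × Int)) :
    l.foldl pvStepF none = (l.find? (fun p => p.2 != 0)).map (fun p => p.1 - 5) := by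
  induction l with
  | nil => rfl
  | cons p l ih =>
    by_cases h : p.2 = 0
    · simp [List.foldl_cons, pvStepF, h, ih]
    · simp [List.foldl_cons, pvStepF, h, pvStepF_some]

theorem pvStepL_eq (l : List (Int × Int)) : ∀ (b : Option Int),
    l.foldl pvStepL b = (match l.reverse.find? (fun p => p.2 != 0) with
                         | some q => some (q.1 + 5) | none => b) := by
  induction l with
  | nil => intro b; rfl
  | cons p l ih =>
    intro b
    rw [List.foldl_cons, ih, List.reverse_cons, List.find?_append]
    cases hf : l.reverse.find? (fun p => p.2 != 0) with
    | some q => simp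
    | none =>
      by_cases h : p.2 = 0 <;>
        simp [h, pvStepL]

-- A's scans over an index list that is the firsts of in-range (index, value) pairs
theorem pvA_fwd_eq (ys : List Int) (l : List (Int × Int))
    (h : ∀ p ∈ l, PySem.List.pyGet? ys p.1 = some p.2) :
    pvA_fwd ys (l.map (·.1)) = (l.find? (fun p => p.2 != 0)).map (fun p => p.1 - 5) := by
  induction l with
  | nil => rfl
  | cons p l ih =>
    have hp := h p (List.mem_cons_self ..)
    have ih' := ih (fun q hq => h q (List.mem_cons_of_mem _ hq))
    by_cases h0 : p.2 = 0 <;>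
      simp [pvA_fwd, hp, h0, ih']

theorem pvA_bwd_eq (ys : List Int) (l : List (Int × Int))
    (h : ∀ p ∈ l, PySem.List.pyGet? ys p.1 = some p.2) :
    pvA_bwd ys (l.map (·.1)) = (l.find? (fun p => p.2 != 0)).map (fun p => p.1 + 5) := by
  induction l with
  | nil => rfl
  | cons p l ih =>
    have hp := h p (List.mem_cons_self ..)
    have ih' := ih (fun q hq => h q (List.mem_cons_of_mem _ hq))
    by_cases h0 : p.2 = 0 <;>
      simp [pvA_bwd, hp, h0, ih']

theorem pvEnum_get (xs ys : List Int) (hlen : xs.length ≤ ys.length) :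
    ∀ p ∈ PySem.List.enumerate (ys.take xs.length) 0, PySem.List.pyGet? ys p.1 = some p.2 := by
  intro p hp
  rw [PySem.List.mem_enumerate_iff] at hp
  obtain ⟨k, hk, rfl⟩ := hp
  have hk' : k < ys.length := lt_of_lt_of_le (lt_of_lt_of_le hk (by simp)) (le_refl _)
  simp only [zero_add]
  rw [PySem.List.pyGet?_natCast]
  have hkx : k < xs.length := by simpa using (lt_of_lt_of_le hk (by simp))
  simp [List.getElem?_eq_getElem (lt_of_lt_of_le hkx hlen)]

theorem pvEnum_firsts (xs ys : List Int) (hlen : xs.length ≤ ys.length) :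
    (PySem.List.enumerate (ys.take xs.length) 0).map (·.1) = PySem.List.pyRange 0 (xs.length : Int) 1 := by
  rw [PySem.List.map_fst_enumerate]
  have : (ys.take xs.length).length = xs.length := by simp [hlen]
  simp [this]

-- ===== VERDICT (by name: the statement is the Claim_ definition above) =====
theorem remove_zero_spec : Claim_equal_remove_zero := by
  intro xs ys _ hpre
  obtain ⟨hlen, hany⟩ := hpre
  unfold Spec_remove_zero remove_zero remove_zero_alt
  have hget := pvEnum_get xs ys hlen
  set l := PySem.List.enumerate (ys.take xs.length) 0 with hl
  have hfw : pvA_fwd ys (PySem.List.pyRange 0 (xs.length : Int) 1)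
      = (l.find? (fun p => p.2 != 0)).map (fun p => p.1 - 5) := by
    rw [← pvEnum_firsts xs ys hlen]; exact pvA_fwd_eq ys l hget
  have hbw : pvA_bwd ys ((PySem.List.pyRange 0 (xs.length : Int) 1).reverse)
      = (l.reverse.find? (fun p => p.2 != 0)).map (fun p => p.1 + 5) := by
    rw [← pvEnum_firsts xs ys hlen, ← List.map_reverse]
    exact pvA_bwd_eq ys l.reverse (fun q hq => hget q (List.mem_reverse.mp hq))
  -- B's fold in terms of the same find?s
  have hslice : PySem.List.slice ys none (some (xs.length : Int)) = ys.take xs.length := by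
    rw [PySem.List.slice_to_natCast]
  rw [hslice, ← hl, pvFold_split, pvStepF_none, hfw, hbw, pvStepL_eq]
  -- Pre_ guarantees both find?s succeed
  have hex : ∃ p ∈ l, (fun p : Int × Int => p.2 != 0) p = true := by
    rw [List.any_eq_true] at hany
    obtain ⟨y, hy, hy0⟩ := hany
    obtain ⟨k, hk, rfl⟩ := List.mem_iff_getElem.mp hy
    exact ⟨(0 + (k : Int), (ys.take xs.length)[k]), by
      rw [hl, PySem.List.mem_enumerate_iff]; exact ⟨k, hk, rfl⟩, hy0⟩
  obtain ⟨sf, hsf⟩ := Option.isSome_iff_exists.mp (List.find?_isSome.mpr hex)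
  have hex' : ∃ p ∈ l.reverse, (fun p : Int × Int => p.2 != 0) p = true := by
    obtain ⟨p, hp, h0⟩ := hex; exact ⟨p, List.mem_reverse.mpr hp, h0⟩
  obtain ⟨sl, hsl⟩ := Option.isSome_iff_exists.mp (List.find?_isSome.mpr hex')
  rw [hsf, hsl]
  rfl
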